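-- pv_equiv track=rewrite | github.com/YavorYanchev/Programming101-Python | week01/diveintopython.py | is_transversal
-- ===== SOURCE A (Python) =====
-- def is_transversal(transversal, family):
--     family_copy = [False for el in family]
--     for x in transversal:
--         grp_num = -1
--         for group in family:
--             grp_num += 1
--             for i in group:
--                 if i == x:
--                     family_copy[grp_num] = True
--     return all(family_copy)
-- ===== SOURCE B (Python) =====
-- def is_transversal(transversal, family):
--     return all(any(x in transversal for x in group) for group in family)
-- ===== Notes on version B (the rewrite author's own statement) =====
-- stated objective: faster
-- what changed: Replaces the boolean marker array filled by a transversal-outer triple loop with a single short-circuiting all/any comprehension that iterates groups first and stops each group at its first hit of the transversal.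
import Mathlib
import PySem

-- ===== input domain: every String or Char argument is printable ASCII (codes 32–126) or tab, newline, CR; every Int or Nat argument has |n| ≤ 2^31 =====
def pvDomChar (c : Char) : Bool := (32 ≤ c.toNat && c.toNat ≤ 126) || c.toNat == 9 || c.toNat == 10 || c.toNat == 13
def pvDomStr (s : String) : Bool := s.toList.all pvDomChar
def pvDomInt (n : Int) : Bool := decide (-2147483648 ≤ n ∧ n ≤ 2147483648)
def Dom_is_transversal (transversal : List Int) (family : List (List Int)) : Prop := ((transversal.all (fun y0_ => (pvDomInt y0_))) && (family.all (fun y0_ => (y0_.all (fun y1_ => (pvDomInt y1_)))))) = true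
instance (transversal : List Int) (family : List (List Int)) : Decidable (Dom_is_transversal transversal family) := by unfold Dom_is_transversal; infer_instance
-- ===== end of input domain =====

-- B replaces A's boolean marker array (filled by a transversal-outer triple loop)
-- with a single short-circuiting all/any scan over the groups; objective: simpler.

-- ===== PORT A =====
-- grp_num starts at -1 and is incremented before use, so it is always ≥ 0 when
-- used as an index; toNat is exact here (comment: index is always in range in Python too).
def is_transversal (transversal : List Int) (family : List (List Int)) : Bool :=
  let family_copy := family.map (fun _ => false)
  let family_copy := transversal.foldl (fun fc x =>
    (family.foldl (fun (st : Int × List Bool) group =>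
        (st.1 + 1,
         group.foldl (fun fc2 i => if i == x then fc2.set (st.1 + 1).toNat true else fc2) st.2))
      (-1, fc)).2) family_copy
  family_copy.all (fun b => b)

-- ===== PORT B =====
def is_transversal_alt (transversal : List Int) (family : List (List Int)) : Bool :=
  family.all (fun group => group.any (fun x => transversal.contains x))

-- ===== PRECONDITION & SPEC =====
def Spec_is_transversal (transversal : List Int) (family : List (List Int)) (out : Bool) : Prop := out = is_transversal_alt transversal family
instance (transversal : List Int) (family : List (List Int)) (out : Bool) : Decidable (Spec_is_transversal transversal family out) := by unfold Spec_is_transversal; infer_instance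

-- ===== CLAIM (what is proved, stated in full; the proofs are below) =====
def Claim_equal_is_transversal : Prop := ∀ (transversal : List Int) (family : List (List Int)), Dom_is_transversal transversal family → Spec_is_transversal transversal family (is_transversal transversal family)

-- ===== LEMMAS AND PROOFS =====

-- what one pass of A's outer-x iteration does, positionally
def pvMarks (x : Int) : List (List Int) → Nat → List Bool → List Bool
  | [], _, fc => fc
  | g :: gs, k, fc => pvMarks x gs (k + 1) (if g.any (fun i => i == x) then fc.set k true else fc)

theorem pv_inner (x : Int) (n : Nat) :
    ∀ (g : List Int) (fc : List Bool),
      g.foldl (fun fc2 i => if i == x then fc2.set n true else fc2) fc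
        = if g.any (fun i => i == x) then fc.set n true else fc := by
  intro g
  induction g with
  | nil => intro fc; simp
  | cons a gs ih =>
    intro fc
    by_cases h : (a == x) = true
    · rw [List.foldl_cons, if_pos h, ih (fc.set n true), List.any_cons, h, Bool.true_or]
      by_cases h2 : (gs.any fun i => i == x) = true
      · rw [if_pos h2, if_pos rfl, List.set_set]
      · rw [if_neg h2, if_pos rfl]
    · rw [List.foldl_cons, if_neg h, ih fc, List.any_cons, Bool.eq_false_iff.mpr h, Bool.false_or]

theorem pv_outer (x : Int) :
    ∀ (fs : List (List Int)) (k : Nat) (fc : List Bool),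
      (fs.foldl (fun (st : Int × List Bool) group =>
          (st.1 + 1,
           group.foldl (fun fc2 i => if i == x then fc2.set (st.1 + 1).toNat true else fc2) st.2))
        (((k : Int)) - 1, fc)).2 = pvMarks x fs k fc := by
  intro fs
  induction fs with
  | nil => intro k fc; simp [pvMarks]
  | cons g gs ih =>
    intro k fc
    have hk : ((k : Int)) - 1 + 1 = ((k + 1 : Nat) : Int) - 1 := by push_cast; ring
    have hn : (((k : Int)) - 1 + 1).toNat = k := by omega
    rw [List.foldl_cons, pv_inner x (((k : Int)) - 1 + 1).toNat g fc, hn, hk, ih (k + 1)]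
    simp only [pvMarks]

theorem pv_marks_append (x : Int) :
    ∀ (fs : List (List Int)) (pre fc : List Bool), fc.length = fs.length →
      pvMarks x fs pre.length (pre ++ fc)
        = pre ++ List.zipWith (fun b g => b || g.any (fun i => i == x)) fc fs := by
  intro fs
  induction fs with
  | nil =>
    intro pre fc h
    have hfc : fc = [] := List.length_eq_zero_iff.mp (by simpa using h)
    subst hfc; simp [pvMarks]
  | cons g gs ih =>
    intro pre fc h
    cases fc with
    | nil => simp at h
    | cons b fc' =>
      simp at h
      have hset : ∀ c : Bool, (pre ++ b :: fc').set pre.length c = pre ++ [c] ++ fc' := by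
        intro c
        rw [List.set_append_right _ _ (le_refl _)]
        simp
      by_cases hg : g.any (fun i => i == x)
      · have := ih (pre ++ [true]) fc' h
        simp only [pvMarks, hg, if_pos, hset true]
        simpa [List.append_assoc, hg] using this
      · have := ih (pre ++ [b]) fc' h
        have hb : pre ++ b :: fc' = (pre ++ [b]) ++ fc' := by simp
        simp only [pvMarks, hg]
        rw [if_neg (by simp [hg]), hb]
        simpa [List.append_assoc, hg] using this

theorem pv_zip_zip (h1 h2 : Bool → List Int → Bool) :
    ∀ (f : List (List Int)) (fc : List Bool),
      List.zipWith h2 (List.zipWith h1 fc f) f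
        = List.zipWith (fun b g => h2 (h1 b g) g) fc f := by
  intro f
  induction f with
  | nil => intro fc; simp
  | cons g gs ih => intro fc; cases fc <;> simp [ih]

theorem pv_zip_id :
    ∀ (f : List (List Int)) (fc : List Bool), fc.length = f.length →
      List.zipWith (fun (b : Bool) (_ : List Int) => b) fc f = fc := by
  intro f
  induction f with
  | nil =>
    intro fc h
    have hfc : fc = [] := List.length_eq_zero_iff.mp (by simpa using h)
    subst hfc; simp
  | cons g gs ih =>
    intro fc h
    cases fc with
    | nil => simp at h
    | cons b fc' => simp at h; simp [ih fc' h]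

theorem pv_any_or (p q : Int → Bool) :
    ∀ (g : List Int), g.any (fun i => p i || q i) = (g.any p || g.any q) := by
  intro g
  induction g with
  | nil => simp
  | cons a gs ih => simp [ih]; cases p a <;> cases q a <;> cases gs.any p <;> simp

theorem pv_fold_marks (f : List (List Int)) :
    ∀ (t : List Int) (fc : List Bool), fc.length = f.length →
      t.foldl (fun fc x => pvMarks x f 0 fc) fc
        = List.zipWith (fun b g => b || g.any (fun i => t.any (fun x => i == x))) fc f := by
  intro t
  induction t with
  | nil =>
    intro fc h
    have hfun : (fun (b : Bool) (g : List Int) => b || g.any fun i => ([] : List Int).any fun x => i == x)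
        = (fun (b : Bool) (_ : List Int) => b) := by
      funext b g; simp
    rw [List.foldl_nil, hfun, pv_zip_id f fc h]
  | cons x ts ih =>
    intro fc h
    have h0 : pvMarks x f 0 fc
        = List.zipWith (fun b g => b || g.any (fun i => i == x)) fc f := by
      have := pv_marks_append x f [] fc h
      simpa using this
    have hlen : (List.zipWith (fun b g => b || g.any (fun i => i == x)) fc f).length = f.length := by
      simp [h]
    rw [List.foldl_cons, h0, ih _ hlen, pv_zip_zip]
    have hfun : (fun (b : Bool) (g : List Int) => (b || g.any fun i => i == x) || g.any fun i => ts.any fun y => i == y)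
        = (fun (b : Bool) (g : List Int) => b || g.any fun i => (x :: ts).any fun y => i == y) := by
      funext b g
      simp only [List.any_cons]
      rw [pv_any_or (fun i => i == x) (fun i => ts.any fun y => i == y) g]
      cases b <;> cases g.any (fun i => i == x) <;> simp
    rw [hfun]

theorem pv_zip_map (h : Bool → List Int → Bool) (m : List Int → Bool) :
    ∀ (f : List (List Int)),
      List.zipWith h (f.map m) f = f.map (fun g => h (m g) g) := by
  intro f
  induction f with
  | nil => simp
  | cons g gs ih => simp [ih]

theorem pv_any_contains (t : List Int) (g : List Int) :
    g.any (fun i => t.any (fun x => i == x)) = g.any (fun x => t.contains x) := by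
  rw [Bool.eq_iff_iff]
  simp only [List.any_eq_true, beq_iff_eq, List.contains_iff_mem]
  constructor
  · rintro ⟨i, hi, x, hx, rfl⟩; exact ⟨i, hi, hx⟩
  · rintro ⟨i, hi, hx⟩; exact ⟨i, hi, i, hx, rfl⟩

-- ===== VERDICT (by name: the statement is the Claim_ definition above) =====
theorem is_transversal_spec : Claim_equal_is_transversal := by
  intro t f _
  unfold Spec_is_transversal is_transversal is_transversal_alt
  simp only
  have hfun : (fun (fc : List Bool) (x : Int) =>
        (f.foldl (fun (st : Int × List Bool) group =>
            (st.1 + 1,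
             group.foldl (fun fc2 i => if i == x then fc2.set (st.1 + 1).toNat true else fc2) st.2))
          (-1, fc)).2)
      = (fun (fc : List Bool) (x : Int) => pvMarks x f 0 fc) := by
    funext fc x
    have := pv_outer x f 0 fc
    simpa using this
  rw [hfun, pv_fold_marks f t _ (by simp), pv_zip_map, List.all_map]
  simp only [Bool.false_or]
  congr 1
  funext g
  exact pv_any_contains t g
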